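-- pv_equiv track=rewrite | github.com/ferneyvanegas/WorldCraft-ASCII-Listas | modules/walls.py | get_coord_walls
-- ===== SOURCE A (Python) =====
-- def get_coord_walls(rows, columns, widhts, longs, dim):
--     '''
--     Parameters:
--     -----------
--     rows: list
--         Lista con filas
--     columns: list
--         Lista con columnas
--     widht: list
--         Lista con los anchos
--     longs: list
--         Lista con los largos
--     dim: int
--         La dimensión del tablero
--     -----------
--     Return:
--     -----------
--     coord_walls: list
--         Lista con coordenadas
--     '''
--     coord_walls = []
--     '''
--         Según la información proporcionada: rows, columns, widhts y longs tienen la misma longitud (En la docu-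
--         mentación es 4). De modo que con saber la longitud de uno de ellos, se infiere la de los demás.
--     '''
--     for index in range(len(rows)):
--         for i in range(rows[index],(rows[index] + longs[index])):
--             for j in range(columns[index], (columns[index] + widhts[index])):
--                 coord_walls.append([i,j])
--
--     '''
--         El manejo de números aleatorios podría generar coordenadas que se exeden de las dimensiones
--         Esas coordenadas no se dibujarán, pero generan basura en la lista a entregar, de modo que se purgan a continuación
--         Para ir eliminando objetos una lista a medida que la voy leyendo, debo hacerlo en forma inversa, ello porque, en este caso,
--         voy a ir eliminando elementos y al hacerlo, la longitud de la lista cambiaría.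
--     '''
--     # Limpiar listado
--     for i in range((len(coord_walls)-1), -1, -1):
--         if coord_walls[i][0] > dim or coord_walls[i][1] > dim:
--             coord_walls.pop(i)
--
--     return coord_walls
-- ===== SOURCE B (Python) =====
-- def get_coord_walls(rows, columns, widhts, longs, dim):
--     coord_walls = []
--     for index in range(len(rows)):
--         for i in range(rows[index], min(rows[index] + longs[index], dim + 1)):
--             for j in range(columns[index], min(columns[index] + widhts[index], dim + 1)):
--                 coord_walls.append([i, j])
--     return coord_walls
-- ===== Notes on version B (the rewrite author's own statement) =====
-- stated objective: simpler
-- what changed: B removes A's second backwards pop-cleanup pass entirely by clamping each generating range's upper bound to min(start+extent, dim+1), so out-of-bounds coordinates are never produced; the result is built in one bounded pass.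
-- outside the precondition, e.g. on get_coord_walls([0, 1], [0], [1], [1, 1], 5): A raises IndexError, B raises IndexError
import Mathlib
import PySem

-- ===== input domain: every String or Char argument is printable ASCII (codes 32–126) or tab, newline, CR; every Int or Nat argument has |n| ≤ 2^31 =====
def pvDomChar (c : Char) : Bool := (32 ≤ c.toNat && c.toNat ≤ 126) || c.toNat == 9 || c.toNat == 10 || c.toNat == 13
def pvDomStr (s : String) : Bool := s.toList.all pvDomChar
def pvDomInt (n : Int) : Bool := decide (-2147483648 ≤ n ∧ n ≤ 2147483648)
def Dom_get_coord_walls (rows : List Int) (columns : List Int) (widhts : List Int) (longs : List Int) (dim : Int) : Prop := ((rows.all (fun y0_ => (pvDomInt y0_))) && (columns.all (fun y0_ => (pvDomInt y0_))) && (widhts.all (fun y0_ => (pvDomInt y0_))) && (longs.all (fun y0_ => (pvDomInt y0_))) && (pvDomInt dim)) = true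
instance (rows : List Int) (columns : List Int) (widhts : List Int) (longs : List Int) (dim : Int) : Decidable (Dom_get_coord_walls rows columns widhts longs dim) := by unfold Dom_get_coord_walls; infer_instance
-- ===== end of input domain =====

-- B drops A's generate-then-purge two-pass shape: it clamps each generating range's upper
-- bound to dim+1 so out-of-bounds coordinates are never created (objective: simpler, one pass).

-- ===== PORT A =====
-- one iteration of A's backwards cleanup loop: 'if coord_walls[i][0] > dim or coord_walls[i][1] > dim: coord_walls.pop(i)'
def pvPurgeStep (dim : Int) (acc : List (List Int)) (i : Int) : List (List Int) :=
  match PySem.List.pyGet? acc i with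
  | none => acc          -- IndexError cannot occur in A's loop
  | some c =>
    match PySem.List.pyGet? c 0, PySem.List.pyGet? c 1 with
    | some a, some b =>
        if a > dim || b > dim then
          match PySem.List.pop? acc i with
          | some r => r.2
          | none => acc  -- unreachable
        else acc
    | _, _ => acc        -- unreachable: every element is [i, j]

def get_coord_walls (rows : List Int) (columns : List Int) (widhts : List Int) (longs : List Int) (dim : Int) : List (List Int) :=
  let cw := (PySem.List.pyRange 0 rows.length 1).foldl (fun acc index =>
    match PySem.List.pyGet? rows index, PySem.List.pyGet? columns index,
          PySem.List.pyGet? widhts index, PySem.List.pyGet? longs index with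
    | some r, some c, some w, some l =>
        (PySem.List.pyRange r (r + l) 1).foldl (fun acc2 i =>
          (PySem.List.pyRange c (c + w) 1).foldl (fun acc3 j => acc3 ++ [[i, j]]) acc2) acc
    | _, _, _, _ => acc) []   -- IndexError (excluded by Pre_)
  (PySem.List.pyRange ((cw.length : Int) - 1) (-1) (-1)).foldl (pvPurgeStep dim) cw

-- ===== PORT B =====
def get_coord_walls_alt (rows : List Int) (columns : List Int) (widhts : List Int) (longs : List Int) (dim : Int) : List (List Int) :=
  (PySem.List.pyRange 0 rows.length 1).foldl (fun acc index =>
    match PySem.List.pyGet? rows index, PySem.List.pyGet? columns index,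
          PySem.List.pyGet? widhts index, PySem.List.pyGet? longs index with
    | some r, some c, some w, some l =>
        (PySem.List.pyRange r (min (r + l) (dim + 1)) 1).foldl (fun acc2 i =>
          (PySem.List.pyRange c (min (c + w) (dim + 1)) 1).foldl (fun acc3 j => acc3 ++ [[i, j]]) acc2) acc
    | _, _, _, _ => acc) []   -- IndexError (excluded by Pre_)

-- ===== PRECONDITION & SPEC =====
-- A indexes columns/widhts/longs by every index of rows, so it raises IndexError when any of them is shorter than rows.
def Pre_get_coord_walls (rows : List Int) (columns : List Int) (widhts : List Int) (longs : List Int) (dim : Int) : Prop :=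
  rows.length ≤ columns.length ∧ rows.length ≤ widhts.length ∧ rows.length ≤ longs.length
instance (rows : List Int) (columns : List Int) (widhts : List Int) (longs : List Int) (dim : Int) : Decidable (Pre_get_coord_walls rows columns widhts longs dim) := by unfold Pre_get_coord_walls; infer_instance
def pvWitness_get_coord_walls : List Int × List Int × List Int × List Int × Int := ([0, 2], [1, 0], [2, 2], [2, 1], 2)

def Spec_get_coord_walls (rows : List Int) (columns : List Int) (widhts : List Int) (longs : List Int) (dim : Int) (out : List (List Int)) : Prop := out = get_coord_walls_alt rows columns widhts longs dim
instance (rows : List Int) (columns : List Int) (widhts : List Int) (longs : List Int) (dim : Int) (out : List (List Int)) : Decidable (Spec_get_coord_walls rows columns widhts longs dim out) := by unfold Spec_get_coord_walls; infer_instance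

-- ===== CLAIM (what is proved, stated in full; the proofs are below) =====
def Claim_equal_get_coord_walls : Prop := ∀ (rows : List Int) (columns : List Int) (widhts : List Int) (longs : List Int) (dim : Int), Dom_get_coord_walls rows columns widhts longs dim → Pre_get_coord_walls rows columns widhts longs dim → Spec_get_coord_walls rows columns widhts longs dim (get_coord_walls rows columns widhts longs dim)

-- ===== LEMMAS AND PROOFS =====

-- the test A's cleanup loop applies to one coordinate pair
def pvKeep (dim : Int) (c : List Int) : Bool :=
  match PySem.List.pyGet? c 0, PySem.List.pyGet? c 1 with
  | some a, some b => !(a > dim || b > dim)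
  | _, _ => true

theorem pvEraseIdx_append (l s : List (List Int)) (x : List Int) :
    (l ++ x :: s).eraseIdx l.length = l ++ s := by
  induction l with
  | nil => rfl
  | cons y t ih => simpa using ih

-- A's backwards pop loop is a filter on the processed prefix
theorem pvPurge_eq_filter (dim : Int) (l s : List (List Int)) :
    (PySem.List.pyRange ((l.length : Int) - 1) (-1) (-1)).foldl (pvPurgeStep dim) (l ++ s)
      = l.filter (pvKeep dim) ++ s := by
  induction l using List.reverseRecOn generalizing s with
  | nil =>
      simp [PySem.List.pyRange_neg_one_eq_nil (by omega : (-1:Int) ≤ -1)]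
  | append_singleton l' x ih =>
      have hlen : ((l' ++ [x]).length : Int) - 1 = (l'.length : Int) := by simp
      rw [hlen, PySem.List.pyRange_neg_one_cons (by omega), List.foldl_cons, List.append_assoc,
        List.singleton_append]
      have hget : PySem.List.pyGet? (l' ++ x :: s) (l'.length : Int) = some x :=
        PySem.List.pyGet?_append_length l' s x
      have hstep : pvPurgeStep dim (l' ++ x :: s) (l'.length : Int) =
          if pvKeep dim x then l' ++ x :: s else l' ++ s := by
        unfold pvPurgeStep pvKeep
        rw [hget]
        cases h0 : PySem.List.pyGet? x 0 with
        | none => simp [h0]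
        | some a =>
          cases h1 : PySem.List.pyGet? x 1 with
          | none => simp [h0, h1]
          | some b =>
            by_cases hb : (a > dim || b > dim) = true
            · have hlt : l'.length < (l' ++ x :: s).length := by simp
              have hp := PySem.List.pop?_natCast (l' ++ x :: s) l'.length hlt
              rw [pvEraseIdx_append] at hp
              simp [h0, h1, hb, hp]
            · simp only [Bool.not_eq_true] at hb
              simp [h0, h1, hb]
      rw [hstep]
      by_cases hk : pvKeep dim x = true
      · rw [if_pos hk, show l' ++ x :: s = l' ++ ([x] ++ s) by simp, ih]
        simp [List.filter_append, hk]
      · simp only [Bool.not_eq_true] at hk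
        rw [if_neg (by simp [hk]), ih]
        simp [List.filter_append, hk]

-- pyRange with a clamped upper bound is the filtered full range
theorem pvRange_min (a b c : Int) :
    PySem.List.pyRange a (min b c) 1 = (PySem.List.pyRange a b 1).filter (fun x => decide (x < c)) := by
  induction hn : (b - a).toNat generalizing a with
  | zero =>
      have hba : b ≤ a := by omega
      rw [PySem.List.pyRange_one_eq_nil hba, PySem.List.pyRange_one_eq_nil (by omega)]
      rfl
  | succ n ihn =>
      have hab : a < b := by omega
      rw [PySem.List.pyRange_one_cons hab]
      by_cases hc : a < c
      · rw [PySem.List.pyRange_one_cons (by omega : a < min b c), ihn (a + 1) (by omega)]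
        simp [hc]
      · rw [PySem.List.pyRange_one_eq_nil (by omega : min b c ≤ a)]
        rw [List.filter_cons_of_neg (by simpa using hc)]
        rw [eq_comm, List.filter_eq_nil_iff]
        intro x hx
        have := PySem.List.mem_pyRange_one.mp hx
        simp; omega

theorem pvKeep_pair (dim i j : Int) :
    pvKeep dim [i, j] = (decide (i < dim + 1) && decide (j < dim + 1)) := by
  have h0 : PySem.List.pyGet? [i, j] 0 = some i := by
    simpa using PySem.List.pyGet?_zero_cons i [j]
  have h1 : PySem.List.pyGet? [i, j] 1 = some j := by
    simpa using PySem.List.pyGet?_cons_succ (x := i) (xs := [j]) (n := 0)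
  have key : ∀ a : Int, (!decide (a > dim)) = decide (a < dim + 1) := fun a => by
    rw [← decide_not, decide_eq_decide]; omega
  simp [pvKeep, Bool.not_or, key]

theorem pvFilter_flatMap {α β : Type} (p : β → Bool) (g : α → List β) (l : List α) :
    (l.flatMap g).filter p = l.flatMap fun x => (g x).filter p := by
  induction l with
  | nil => rfl
  | cons y t ih => simp [List.filter_append, ih]

theorem pvFilter_map {α β : Type} (f : α → β) (p : β → Bool) (l : List α) :
    (l.map f).filter p = (l.filter (fun x => p (f x))).map f := by
  induction l with
  | nil => rfl
  | cons y t ih => by_cases h : p (f y) <;> simp [h, ih]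

theorem pvFlatMap_filter_eq {α β : Type} (p : α → Bool) (g h : α → List β) (l : List α)
    (hg : ∀ x ∈ l, p x = true → g x = h x) (hh : ∀ x ∈ l, p x = false → h x = []) :
    (l.filter p).flatMap g = l.flatMap h := by
  induction l with
  | nil => rfl
  | cons y t ih =>
      have iht := ih (fun x hx => hg x (List.mem_cons_of_mem _ hx))
        (fun x hx => hh x (List.mem_cons_of_mem _ hx))
      by_cases hy : p y = true
      · simp [hy, hg y List.mem_cons_self hy, iht]
      · simp only [Bool.not_eq_true] at hy
        simp [hy, hh y List.mem_cons_self hy, iht]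

-- the 'rows[index], columns[index], widhts[index], longs[index]' dispatch both loops share
def pvGetsBlock (rows columns widhts longs : List Int) (f : Int → Int → Int → Int → List (List Int)) (index : Int) : List (List Int) :=
  match PySem.List.pyGet? rows index, PySem.List.pyGet? columns index,
        PySem.List.pyGet? widhts index, PySem.List.pyGet? longs index with
  | some r, some c, some w, some l => f r c w l
  | _, _, _, _ => []

def pvBodyA (_dim r c w l : Int) : List (List Int) :=
  (PySem.List.pyRange r (r + l) 1).flatMap fun i =>
    (PySem.List.pyRange c (c + w) 1).map fun j => [i, j]

def pvBodyB (dim r c w l : Int) : List (List Int) :=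
  (PySem.List.pyRange r (min (r + l) (dim + 1)) 1).flatMap fun i =>
    (PySem.List.pyRange c (min (c + w) (dim + 1)) 1).map fun j => [i, j]

theorem pvA_eq (rows columns widhts longs : List Int) (dim : Int) :
    get_coord_walls rows columns widhts longs dim
      = ((PySem.List.pyRange 0 rows.length 1).flatMap
          (pvGetsBlock rows columns widhts longs (pvBodyA dim))).filter (pvKeep dim) := by
  unfold get_coord_walls
  have hbody : (PySem.List.pyRange 0 rows.length 1).foldl (fun acc index =>
      match PySem.List.pyGet? rows index, PySem.List.pyGet? columns index,
            PySem.List.pyGet? widhts index, PySem.List.pyGet? longs index with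
      | some r, some c, some w, some l =>
          (PySem.List.pyRange r (r + l) 1).foldl (fun acc2 i =>
            (PySem.List.pyRange c (c + w) 1).foldl (fun acc3 j => acc3 ++ [[i, j]]) acc2) acc
      | _, _, _, _ => acc) []
    = (PySem.List.pyRange 0 rows.length 1).flatMap
        (pvGetsBlock rows columns widhts longs (pvBodyA dim)) := by
    rw [PySem.List.foldl_congr_mem (g := fun acc index =>
        acc ++ pvGetsBlock rows columns widhts longs (pvBodyA dim) index)]
    · rw [PySem.List.foldl_append_eq_flatMap]; simp
    · intro acc x _
      unfold pvGetsBlock pvBodyA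
      cases PySem.List.pyGet? rows x with
      | none => simp
      | some r =>
        cases PySem.List.pyGet? columns x with
        | none => simp
        | some c =>
          cases PySem.List.pyGet? widhts x with
          | none => simp
          | some w =>
            cases PySem.List.pyGet? longs x with
            | none => simp
            | some l =>
              simp only [PySem.List.foldl_append_singleton_eq_map]
              rw [PySem.List.foldl_append_eq_flatMap]
  rw [hbody]
  have := pvPurge_eq_filter dim ((PySem.List.pyRange 0 rows.length 1).flatMap
    (pvGetsBlock rows columns widhts longs (pvBodyA dim))) []
  simpa using this

theorem pvB_eq (rows columns widhts longs : List Int) (dim : Int) :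
    get_coord_walls_alt rows columns widhts longs dim
      = (PySem.List.pyRange 0 rows.length 1).flatMap
          (pvGetsBlock rows columns widhts longs (pvBodyB dim)) := by
  unfold get_coord_walls_alt
  rw [PySem.List.foldl_congr_mem (g := fun acc index =>
      acc ++ pvGetsBlock rows columns widhts longs (pvBodyB dim) index)]
  · rw [PySem.List.foldl_append_eq_flatMap]; simp
  · intro acc x _
    unfold pvGetsBlock pvBodyB
    cases PySem.List.pyGet? rows x with
    | none => simp
    | some r =>
      cases PySem.List.pyGet? columns x with
      | none => simp
      | some c =>
        cases PySem.List.pyGet? widhts x with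
        | none => simp
        | some w =>
          cases PySem.List.pyGet? longs x with
          | none => simp
          | some l =>
            simp only [PySem.List.foldl_append_singleton_eq_map]
            rw [PySem.List.foldl_append_eq_flatMap]

theorem pvBody_filter (dim r c w l : Int) :
    (pvBodyA dim r c w l).filter (pvKeep dim) = pvBodyB dim r c w l := by
  unfold pvBodyA pvBodyB
  rw [pvFilter_flatMap]
  rw [pvRange_min r (r + l) (dim + 1)]
  rw [eq_comm]
  apply pvFlatMap_filter_eq
  · intro i _ hi
    rw [pvRange_min c (c + w) (dim + 1), pvFilter_map]
    congr 1
    apply List.filter_congr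
    intro j _
    simp only [decide_eq_true_eq] at hi
    simp [pvKeep_pair]
    omega
  · intro i _ hi
    rw [pvFilter_map]
    have : (PySem.List.pyRange c (c + w) 1).filter (fun j => pvKeep dim [i, j]) = [] := by
      apply List.filter_eq_nil_iff.mpr
      intro j _
      simp only [decide_eq_false_iff_not] at hi
      simp [pvKeep_pair]
      omega
    rw [this, List.map_nil]

-- ===== VERDICT (by name: the statement is the Claim_ definition above) =====
theorem get_coord_walls_spec : Claim_equal_get_coord_walls := by
  intro rows columns widhts longs dim _ _
  unfold Spec_get_coord_walls
  rw [pvA_eq, pvB_eq, pvFilter_flatMap]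
  apply List.flatMap_congr
  intro x _
  unfold pvGetsBlock
  cases PySem.List.pyGet? rows x with
  | none => rfl
  | some r =>
    cases PySem.List.pyGet? columns x with
    | none => rfl
    | some c =>
      cases PySem.List.pyGet? widhts x with
      | none => rfl
      | some w =>
        cases PySem.List.pyGet? longs x with
        | none => rfl
        | some l => exact pvBody_filter dim r c w l
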